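-- pv_equiv track=rewrite | github.com/edatkinson/ACFIM0015_2024_Algorithmic_Trading | Cousework/tools.py | buyer_seller_ratios
-- ===== SOURCE A (Python) =====
-- def buyer_seller_ratios(equal_ratio: int, traders):
--     """
--     Calculates all possible permutations of buyer/seller ratios for N traders,
--     ensuring an equal number of buyers and sellers.
--
--     Args:
--         equal_ratio: The ratio of buyers to sellers for each trader type.
--                      e.g., 2 means each trader type has twice as many buyers as sellers
--         traders: A list of trader names (strings).
--
--     Returns:
--         A list of dictionaries. Each dictionary represents a valid configuration
--         of buyer/seller ratios, where keys are trader names and values are the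
--         number of buyers for that trader type.  Returns an empty list if no valid
--         combinations are found.
--     """
--
--     n_trader_types = len(traders)
--     n_traders = equal_ratio * n_trader_types  # Total number of buyers (and sellers)
--
--     results = []
--
--     # Generate all possible combinations of buyer counts for each trader type.
--     # The sum of these counts must equal n_traders. We use a generator to avoid
--     # storing all combinations in memory at once.
--     for combination in _generate_combinations(n_traders, n_trader_types):
--         # Check if the combination is valid (sums to n_traders)
--         if sum(combination) == n_traders and all(count >= 1 for count in combination): #Check for at least 1 of each
--             buyer_spec = {}
--             for i, trader in enumerate(traders):
--                 buyer_spec[trader] = combination[i]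
--             results.append(buyer_spec)
--
--     results_formatted = []
--     for res in results:
--         results_formatted.append(list(res.items()))
--
--     return results_formatted
--
-- def _generate_combinations(total: int, num_elements: int):
--     """
--     Generates all possible combinations of non-negative integers that sum to a given total and have a specific number of elements.  Uses recursion.
--
--     Args:
--         total: The target sum.
--         num_elements: The number of integers in each combination.
--
--     Yields:
--         A tuple representing a valid combination.
--     """
--     if num_elements == 0:
--         if total == 0:
--             yield ()  # Base case: empty tuple if total is also 0
--         return
--
--     if total < 0: # Pruning to avoid unnecessary recursion
--         return
--
--     for i in range(total + 1):  # Iterate through possible values for the current element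
--         for sub_combination in _generate_combinations(total - i, num_elements - 1):
--             yield (i,) + sub_combination  # Add current value to the sub-combination
-- ===== SOURCE B (Python) =====
-- def buyer_seller_ratios(equal_ratio: int, traders):
--     """Enumerate positive compositions directly (each part >= 1, with remaining-capacity
--     bound) instead of generating all non-negative compositions and filtering."""
--     n = len(traders)
--     total = equal_ratio * n
--     out = []
--     def build(remaining, parts, prefix):
--         if parts == 0:
--             if remaining == 0:
--                 out.append(list(dict(zip(traders, prefix)).items()))
--             return
--         for i in range(1, remaining - (parts - 1) + 1):
--             build(remaining - i, parts - 1, prefix + (i,))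
--     build(total, n, ())
--     return out
-- ===== Notes on version B (the rewrite author's own statement) =====
-- stated objective: alternative
-- what changed: B recursively enumerates the positive compositions directly (each part starts at 1, bounded by the remaining capacity) instead of generating every non-negative composition and filtering out those with a zero part; it avoids A's larger search space but the result list itself grows combinatorially, so no speed is claimed.
import Mathlib
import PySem

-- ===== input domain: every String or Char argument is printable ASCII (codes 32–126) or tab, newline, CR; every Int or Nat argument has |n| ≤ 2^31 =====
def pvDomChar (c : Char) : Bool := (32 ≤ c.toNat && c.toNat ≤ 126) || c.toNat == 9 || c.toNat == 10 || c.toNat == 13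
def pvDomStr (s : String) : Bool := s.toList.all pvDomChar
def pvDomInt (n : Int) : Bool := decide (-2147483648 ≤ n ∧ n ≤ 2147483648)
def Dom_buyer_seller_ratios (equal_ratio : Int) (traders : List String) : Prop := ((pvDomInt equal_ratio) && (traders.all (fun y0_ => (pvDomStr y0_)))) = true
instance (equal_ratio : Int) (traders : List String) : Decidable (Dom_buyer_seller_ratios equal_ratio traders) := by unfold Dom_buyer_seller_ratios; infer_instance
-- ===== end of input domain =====

-- B enumerates the positive compositions directly (each part starts at 1, with a
-- remaining-capacity bound) instead of generating all non-negative compositions and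
-- filtering out those with a zero part (output-sized enumeration).

-- ===== PORT A =====
-- _generate_combinations(total, num_elements): all tuples of non-negative ints summing to total
def genCombos (total : Int) : Nat → List (List Int)
  | 0 => if total = 0 then [[]] else []
  | k+1 =>
      if total < 0 then []
      else
        (PySem.List.pyRange 0 (total+1) 1).flatMap
          (fun i => (genCombos (total - i) k).map (fun sub => i :: sub))

def buyer_seller_ratios (equal_ratio : Int) (traders : List String) : List (List (String × Int)) :=
  let n_trader_types := traders.length
  let n_traders := equal_ratio * (n_trader_types : Int)
  let results :=
    (genCombos n_traders n_trader_types).filter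
      (fun combination =>
        combination.sum == n_traders && combination.all (fun count => decide (1 ≤ count)))
  -- buyer_spec[trader] = combination[i]; the index i is always in range, since every
  -- generated combination has length len(traders) (pyGetD is the total in-range form)
  let results_dicts :=
    results.map (fun combination =>
      (PySem.List.enumerate traders 0).foldl
        (fun (d : PySem.Dict String Int) p =>
          d.insert p.2 (PySem.List.pyGetD combination p.1 0))
        PySem.Dict.empty)
  results_dicts.map (fun d => d.items)

-- ===== PORT B =====
-- build(remaining, parts, prefix): extend prefix with parts positive ints summing to remaining
def bsrBuild (traders : List String) : Int → Nat → List Int → List (List (String × Int)) → List (List (String × Int))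
  | remaining, 0, pre, out =>
      if remaining = 0 then out ++ [(PySem.Dict.ofList (traders.zip pre)).items] else out
  | remaining, k+1, pre, out =>
      (PySem.List.pyRange 1 (remaining - k + 1) 1).foldl
        (fun acc i => bsrBuild traders (remaining - i) k (pre ++ [i]) acc) out

def buyer_seller_ratios_alt (equal_ratio : Int) (traders : List String) : List (List (String × Int)) :=
  bsrBuild traders (equal_ratio * (traders.length : Int)) traders.length [] []

-- ===== PRECONDITION & SPEC =====
def Spec_buyer_seller_ratios (equal_ratio : Int) (traders : List String) (out : List (List (String × Int))) : Prop := out = buyer_seller_ratios_alt equal_ratio traders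
instance (equal_ratio : Int) (traders : List String) (out : List (List (String × Int))) : Decidable (Spec_buyer_seller_ratios equal_ratio traders out) := by unfold Spec_buyer_seller_ratios; infer_instance

-- ===== CLAIM (what is proved, stated in full; the proofs are below) =====
def Claim_equal_buyer_seller_ratios : Prop := ∀ (equal_ratio : Int) (traders : List String), Dom_buyer_seller_ratios equal_ratio traders → Spec_buyer_seller_ratios equal_ratio traders (buyer_seller_ratios equal_ratio traders)

-- ===== LEMMAS AND PROOFS =====

-- the positive compositions of r into k parts, in B's (lexicographic) order
def posComp (r : Int) : Nat → List (List Int)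
  | 0 => if r = 0 then [[]] else []
  | k+1 =>
      (PySem.List.pyRange 1 (r - k + 1) 1).flatMap
        (fun i => (posComp (r - i) k).map (fun sub => i :: sub))

lemma sum_mem_genCombos : ∀ (k : Nat) (t : Int) (c : List Int), c ∈ genCombos t k → c.sum = t := by
  intro k
  induction k with
  | zero => intro t c hc; simp [genCombos] at hc; obtain ⟨rfl, rfl⟩ := hc; rfl
  | succ k ih =>
      intro t c hc
      simp only [genCombos] at hc
      split at hc
      · simp at hc
      · simp only [List.mem_flatMap, List.mem_map] at hc
        obtain ⟨i, _, sub, hsub, rfl⟩ := hc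
        have := ih _ _ hsub
        simp [this]

lemma posComp_eq_nil (k : Nat) (t : Int) (h : t < (k : Int)) : posComp t k = [] := by
  cases k with
  | zero => simp only [posComp]; rw [if_neg]; omega
  | succ k =>
      simp only [posComp]
      rw [PySem.List.pyRange_one_eq_nil (by push_cast at h ⊢; omega)]
      simp

lemma length_mem_posComp : ∀ (k : Nat) (t : Int) (c : List Int), c ∈ posComp t k → c.length = k := by
  intro k
  induction k with
  | zero => intro t c hc; simp [posComp] at hc; obtain ⟨rfl, rfl⟩ := hc; rfl
  | succ k ih =>
      intro t c hc
      simp only [posComp, List.mem_flatMap, List.mem_map] at hc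
      obtain ⟨i, _, sub, hsub, rfl⟩ := hc
      simp [ih _ _ hsub]

lemma filter_genCombos : ∀ (k : Nat) (t : Int),
    (genCombos t k).filter (fun c => c.all (fun x => decide (1 ≤ x))) = posComp t k := by
  intro k
  induction k with
  | zero => intro t; simp only [genCombos, posComp]; split <;> simp
  | succ k ih =>
      intro t
      by_cases ht : t < 0
      · simp only [genCombos, posComp, if_pos ht]
        rw [PySem.List.pyRange_one_eq_nil (by omega)]
        simp
      · push Not at ht
        simp only [genCombos, if_neg (by omega : ¬ t < 0)]
        rw [PySem.List.pyRange_one_cons (by omega : (0:Int) < t + 1)]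
        rw [List.flatMap_cons, List.filter_append, List.filter_flatMap]
        have h0 : List.filter (fun c => c.all (fun x => decide (1 ≤ x)))
            ((genCombos (t - 0) k).map (fun sub => (0:Int) :: sub)) = [] := by
          rw [List.filter_map]
          have : ((fun c => c.all (fun x => decide (1 ≤ x))) ∘ (fun sub => (0:Int) :: sub))
              = fun _ => false := by
            funext sub; simp
          rw [this]; simp
        rw [h0, List.nil_append]
        have hcong : ∀ i ∈ PySem.List.pyRange (0+1) (t+1) 1,
            List.filter (fun c => c.all (fun x => decide (1 ≤ x)))
              ((genCombos (t - i) k).map (fun sub => i :: sub))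
            = (posComp (t - i) k).map (fun sub => i :: sub) := by
          intro i hi
          rw [PySem.List.mem_pyRange_one] at hi
          rw [List.filter_map]
          have : ((fun c => c.all (fun x => decide (1 ≤ x))) ∘ (fun sub => i :: sub))
              = fun c => c.all (fun x => decide (1 ≤ x)) := by
            funext sub
            simp only [Function.comp_apply, List.all_cons]
            rw [decide_eq_true (by omega : (1:Int) ≤ i), Bool.true_and]
          rw [this, ih]
        rw [List.flatMap_congr hcong]
        simp only [zero_add]
        -- now compare the ranges [1, t+1) and [1, t-k+1)
        simp only [posComp]
        by_cases hk : (k : Int) ≤ t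
        · rw [PySem.List.pyRange_one_append 1 (t - k + 1) (t + 1) (by omega) (by omega),
            List.flatMap_append]
          have htail : (PySem.List.pyRange (t - k + 1) (t + 1) 1).flatMap
              (fun i => (posComp (t - i) k).map (fun sub => i :: sub)) = [] := by
            rw [List.flatMap_congr (g := fun _ => []) ?_]
            · simp
            intro i hi
            rw [PySem.List.mem_pyRange_one] at hi
            rw [posComp_eq_nil k (t - i) (by omega)]
            simp
          rw [htail, List.append_nil]
        · rw [PySem.List.pyRange_one_eq_nil (a := 1) (b := t - k + 1) (by omega)]
          rw [List.flatMap_congr (g := fun _ => []) ?_]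
          · simp
          intro i hi
          rw [PySem.List.mem_pyRange_one] at hi
          rw [posComp_eq_nil k (t - i) (by omega)]
          simp

lemma dict_fold_enum (cf : List Int) :
    ∀ (traders : List String) (s : Nat) (d : PySem.Dict String Int),
    cf.length = s + traders.length →
    (PySem.List.enumerate traders (s : Int)).foldl
      (fun (d : PySem.Dict String Int) p =>
        d.insert p.2 (PySem.List.pyGetD cf p.1 0)) d
    = (traders.zip (cf.drop s)).foldl (fun d p => d.insert p.1 p.2) d := by
  intro traders
  induction traders with
  | nil => intro s d _; simp [PySem.List.enumerate_nil]
  | cons t ts ih =>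
      intro s d hlen
      have hs : s < cf.length := by simp at hlen; omega
      rw [PySem.List.enumerate_cons]
      have hdrop : cf.drop s = cf[s] :: cf.drop (s + 1) := List.drop_eq_getElem_cons hs
      rw [hdrop]
      simp only [List.zip_cons_cons, List.foldl_cons]
      rw [PySem.List.pyGetD_natCast, List.getD_eq_getElem?_getD, List.getElem?_eq_getElem hs,
        Option.getD_some]
      have : ((s : Int) + 1) = ((s + 1 : Nat) : Int) := by push_cast; ring
      rw [this, ih (s + 1) _ (by simp at hlen ⊢; omega)]

lemma bsrBuild_spec (traders : List String) : ∀ (k : Nat) (r : Int) (pre : List Int)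
    (out : List (List (String × Int))),
    bsrBuild traders r k pre out
    = out ++ (posComp r k).map
        (fun c => (PySem.Dict.ofList (traders.zip (pre ++ c))).items) := by
  intro k
  induction k with
  | zero =>
      intro r pre out
      simp only [bsrBuild, posComp]
      split <;> simp
  | succ k ih =>
      intro r pre out
      simp only [bsrBuild, posComp]
      have hfun : (fun (acc : List (List (String × Int))) (i : Int) =>
          bsrBuild traders (r - i) k (pre ++ [i]) acc)
          = fun acc i => acc ++ (posComp (r - i) k).map
              (fun c => (PySem.Dict.ofList (traders.zip ((pre ++ [i]) ++ c))).items) := by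
        funext acc i; exact ih (r - i) (pre ++ [i]) acc
      rw [hfun, PySem.List.foldl_append_eq_flatMap]
      simp [List.map_flatMap, List.map_map, Function.comp_def]

-- ===== VERDICT (by name: the statement is the Claim_ definition above) =====
theorem buyer_seller_ratios_spec : Claim_equal_buyer_seller_ratios := by
  intro equal_ratio traders _
  unfold Spec_buyer_seller_ratios buyer_seller_ratios buyer_seller_ratios_alt
  simp only []
  set n := traders.length with hn
  set t := equal_ratio * (n : Int) with htdef
  rw [List.filter_congr (q := fun c => c.all (fun x => decide (1 ≤ x)))
      (fun c hc => by simp [sum_mem_genCombos n t c hc])]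
  rw [filter_genCombos]
  rw [bsrBuild_spec traders n t [] []]
  rw [List.nil_append, List.map_map]
  refine List.map_congr_left ?_
  intro c hc
  have hlen : c.length = n := length_mem_posComp n t c hc
  have := dict_fold_enum c traders 0 PySem.Dict.empty (by simpa [hlen] using hn)
  simp only [Nat.cast_zero, List.drop_zero] at this
  simp only [Function.comp_apply, List.nil_append]
  rw [this]
  rfl
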